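-- pv_equiv track=rewrite | github.com/Neural-Symbolic-Image-Labeling/Rapid | al/strategies/informativeness.py | get_panel
-- ===== SOURCE A (Python) =====
-- def get_panel_obj(X_objs):
--     common_objs = [el for sublist in X_objs for el in sublist]
--     return max(common_objs, key=common_objs.count)
--
-- def get_panel(X_objs, y):
--     results = {}
--     for i in range(0,len(X_objs)):
--         if y[i] not in results:
--             results[y[i]] = []
--         results[y[i]].append(i)
--     output = {}
--     for key, value in results.items():
--         temp = []
--         for item in value:
--             temp.append(X_objs[item])
--         output[key] = get_panel_obj(temp)
--     return output
-- ===== SOURCE B (Python) =====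
-- def get_panel(X_objs, y):
--     # Streaming mode: one pass over (row, label) pairs; per label keep element
--     # counts, first-appearance ranks, and the current winner, updated online by
--     # the lexicographic key (count, -rank).  No index grouping, no flattened
--     # list rebuild, and no max() pass at the end.
--     state = {}  # label -> [counts, first, winner, next_rank]
--     for objs, lab in zip(X_objs, y):
--         st = state.get(lab)
--         if st is None:
--             st = [{}, {}, None, 0]
--             state[lab] = st
--         counts, first = st[0], st[1]
--         for el in objs:
--             if el not in first:
--                 first[el] = st[3]
--                 st[3] += 1
--             counts[el] = counts.get(el, 0) + 1
--             b = st[2]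
--             if b is None or (counts[el], -first[el]) > (counts[b], -first[b]):
--                 st[2] = el
--     return {lab: st[2] for lab, st in state.items()}
-- ===== Notes on version B (the rewrite author's own statement) =====
-- stated objective: faster
-- what changed: Replaces A's staged group-then-max pipeline (group indices by label, rebuild flattened lists, max with the quadratic list.count key) by a single streaming pass that maintains, per label, element counts, first-appearance ranks and the current winner updated online via the lexicographic key (count, -rank); no grouping pass and no final max().
import Mathlib
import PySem

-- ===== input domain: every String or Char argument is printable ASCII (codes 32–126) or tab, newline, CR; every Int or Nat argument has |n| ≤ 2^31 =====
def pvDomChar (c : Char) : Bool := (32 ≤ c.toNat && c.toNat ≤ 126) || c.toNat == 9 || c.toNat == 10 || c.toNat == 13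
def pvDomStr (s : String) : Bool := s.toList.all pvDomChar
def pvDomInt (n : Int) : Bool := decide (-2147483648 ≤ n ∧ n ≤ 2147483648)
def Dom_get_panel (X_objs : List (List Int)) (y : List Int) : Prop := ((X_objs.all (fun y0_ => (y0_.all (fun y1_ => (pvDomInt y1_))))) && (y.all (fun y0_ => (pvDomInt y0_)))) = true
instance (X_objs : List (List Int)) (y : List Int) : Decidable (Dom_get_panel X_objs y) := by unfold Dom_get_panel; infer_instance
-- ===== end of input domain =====

-- B replaces A's staged pipeline (group indices by label, rebuild flattened lists,
-- max with the quadratic list.count key) by ONE streaming pass that keeps, per label,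
-- element counts, first-appearance ranks and the current winner, updated online by the
-- lexicographic key (count, -rank) — no grouping pass, no final max (objective: faster).

-- ===== PORT A =====
-- max(common_objs, key=common_objs.count); [] case is Python's ValueError, unreachable under Pre_
def pyMaxByCount (xs : List Int) : Int :=
  match xs with
  | [] => 0
  | h :: t => t.foldl (fun best el => if xs.count el > xs.count best then el else best) h

def get_panel_obj (temp : List (List Int)) : Int :=
  pyMaxByCount temp.flatten

def get_panel (X_objs : List (List Int)) (y : List Int) : List (Int × Int) :=
  let results : PySem.Dict Int (List Int) :=
    (PySem.List.pyRange 0 (PySem.List.len X_objs)).foldl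
      (fun d i =>
        let lbl := PySem.List.pyGetD y i 0
        let d := if d.contains lbl then d else d.insert lbl []
        d.insert lbl (d.getD lbl [] ++ [i]))
      PySem.Dict.empty
  let output : PySem.Dict Int Int :=
    results.items.foldl
      (fun out kv =>
        let temp := kv.2.foldl (fun acc item => acc ++ [PySem.List.pyGetD X_objs item []]) []
        out.insert kv.1 (get_panel_obj temp))
      PySem.Dict.empty
  output.items

-- ===== PORT B =====
-- per-label streaming state [counts, first, winner, next_rank]; winner is none (Python's
-- None) only while the label's group is still empty, which Pre_ makes unreachable in the
-- output, so the final comprehension renders it with .getD 0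
abbrev pvSt : Type := PySem.Dict Int Int × PySem.Dict Int Int × Option Int × Int

def pvInitSt : pvSt := (PySem.Dict.empty, PySem.Dict.empty, none, 0)

-- Python tuple comparison (c1, -f1) > (c2, -f2)
def pvLexGT (c1 f1 c2 f2 : Int) : Bool := c1 > c2 || (c1 == c2 && f1 < f2)

def pvElStep (st : pvSt) (el : Int) : pvSt :=
  let fr : PySem.Dict Int Int × Int :=
    if st.2.1.contains el then (st.2.1, st.2.2.2) else (st.2.1.insert el st.2.2.2, st.2.2.2 + 1)
  let counts := st.1.insert el (st.1.getD el 0 + 1)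
  let best :=
    match st.2.2.1 with
    | none => some el
    | some b =>
      if pvLexGT (counts.getD el 0) (fr.1.getD el 0) (counts.getD b 0) (fr.1.getD b 0)
      then some el else some b
  (counts, fr.1, best, fr.2)

def pvRowStep (st : pvSt) (objs : List Int) : pvSt := objs.foldl pvElStep st

def get_panel_alt (X_objs : List (List Int)) (y : List Int) : List (Int × Int) :=
  let state : PySem.Dict Int pvSt :=
    (X_objs.zip y).foldl
      (fun s p => s.insert p.2 (pvRowStep (s.getD p.2 pvInitSt) p.1))
      PySem.Dict.empty
  state.items.map (fun kv => (kv.1, kv.2.2.2.1.getD 0))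

-- ===== PRECONDITION & SPEC =====
-- Pre_ excludes exactly the inputs on which A raises: IndexError on y[i] when y is
-- shorter than X_objs, and ValueError (max of an empty sequence) when every row of
-- some label's group is empty.
def Pre_get_panel (X_objs : List (List Int)) (y : List Int) : Prop :=
  X_objs.length ≤ y.length ∧
  ∀ i ∈ List.range X_objs.length, ∃ j ∈ List.range X_objs.length,
    y.getD j 0 = y.getD i 0 ∧ X_objs.getD j [] ≠ []
instance (X_objs : List (List Int)) (y : List Int) : Decidable (Pre_get_panel X_objs y) := by
  unfold Pre_get_panel; infer_instance
def pvWitness_get_panel : List (List Int) × List Int := ([[1], [2, 2]], [5, 5])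

def Spec_get_panel (X_objs : List (List Int)) (y : List Int) (out : List (Int × Int)) : Prop :=
  out = get_panel_alt X_objs y
instance (X_objs : List (List Int)) (y : List Int) (out : List (Int × Int)) :
    Decidable (Spec_get_panel X_objs y out) := by unfold Spec_get_panel; infer_instance

-- ===== CLAIM (what is proved, stated in full; the proofs are below) =====
def Claim_equal_get_panel : Prop := ∀ (X_objs : List (List Int)) (y : List Int),
  Dom_get_panel X_objs y → Pre_get_panel X_objs y → Spec_get_panel X_objs y (get_panel X_objs y)
-- ===== LEMMAS AND PROOFS =====

-- the (label, row) sequence both programs group by, and a label's flattened group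
def pvQ (X_objs : List (List Int)) (y : List Int) : List (Int × List Int) :=
  (X_objs.zip y).map (fun p => (p.2, p.1))
def pvF (X_objs : List (List Int)) (y : List Int) (c : Int) : List Int :=
  (((pvQ X_objs y).filter (fun p => p.1 == c)).map Prod.snd).flatten
def selMax (f : Int → Int) : Int → Int → Int := fun b x => if f x > f b then x else b

theorem bridge (X_objs : List (List Int)) (y : List Int) (h : X_objs.length ≤ y.length) :
    (PySem.List.pyRange 0 (PySem.List.len X_objs)).map
      (fun i => (PySem.List.pyGetD y i 0, PySem.List.pyGetD X_objs i [])) = pvQ X_objs y := by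
  have hz : (X_objs.zip y).length = X_objs.length := by
    simp [List.length_zip]; omega
  have hlen : PySem.List.len (X_objs.zip y) = PySem.List.len X_objs := by
    simp [PySem.List.len, hz]
  unfold pvQ
  conv_rhs => rw [← PySem.List.map_pyGetD_pyRange_zero (X_objs.zip y) (([], 0) : List Int × Int)]
  rw [hlen, List.map_map]
  apply List.map_congr_left
  intro i hi
  obtain ⟨h0, hlt⟩ := PySem.List.mem_pyRange_one.mp hi
  obtain ⟨k, rfl⟩ := Int.eq_ofNat_of_zero_le h0
  have hk : k < X_objs.length := by
    simp [PySem.List.len] at hlt; exact_mod_cast hlt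
  have hky : k < y.length := lt_of_lt_of_le hk h
  have hkz : k < (X_objs.zip y).length := by omega
  simp only [Function.comp, PySem.List.pyGetD_natCast]
  rw [List.getD_eq_getElem _ _ hkz, List.getD_eq_getElem _ _ hky, List.getD_eq_getElem _ _ hk,
    List.getElem_zip]

theorem stepA (y : List Int) (d : PySem.Dict Int (List Int)) (i : Int) :
    (let lbl := PySem.List.pyGetD y i 0
     let d := if d.contains lbl then d else d.insert lbl []
     d.insert lbl (d.getD lbl [] ++ [i]))
    = d.modify (PySem.List.pyGetD y i 0) [] (· ++ [i]) := by
  set lbl := PySem.List.pyGetD y i 0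
  show (if d.contains lbl then d else d.insert lbl []).insert lbl
      ((if d.contains lbl then d else d.insert lbl []).getD lbl [] ++ [i])
    = d.modify lbl [] (· ++ [i])
  by_cases hc : d.contains lbl
  · simp only [hc, if_true]; rfl
  · simp only [hc, Bool.false_eq_true, if_false]
    rw [PySem.Dict.getD_insert_self, PySem.Dict.insert_insert_self]
    show _ = d.insert lbl (d.getD lbl [] ++ [i])
    rw [PySem.Dict.getD_of_not_contains d [] (Bool.not_eq_true _ ▸ eq_false_of_ne_true hc)]

def stepAfun (y : List Int) : PySem.Dict Int (List Int) -> Int -> PySem.Dict Int (List Int) :=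
  fun d i =>
    let lbl := PySem.List.pyGetD y i 0
    let d := if d.contains lbl then d else d.insert lbl []
    d.insert lbl (d.getD lbl [] ++ [i])
def outAfun (X_objs : List (List Int)) : PySem.Dict Int Int -> Int × List Int -> PySem.Dict Int Int :=
  fun out kv =>
    let temp := kv.2.foldl (fun acc item => acc ++ [PySem.List.pyGetD X_objs item []]) []
    out.insert kv.1 (get_panel_obj temp)

theorem resultsA (X_objs : List (List Int)) (y : List Int) :
    (PySem.List.pyRange 0 (PySem.List.len X_objs)).foldl (stepAfun y) PySem.Dict.empty
    = ((PySem.List.pyRange 0 (PySem.List.len X_objs)).map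
        (fun i => ((PySem.List.pyGetD y i 0 : Int), i))).foldl
        (fun d p => d.modify p.1 [] (fun v => v ++ [p.2])) PySem.Dict.empty := by
  rw [List.foldl_map]
  exact PySem.List.foldl_congr_mem _ _ _ _ (fun d i _ => stepA y d i)

theorem A_closed (X_objs : List (List Int)) (y : List Int) (h : X_objs.length <= y.length) :
    get_panel X_objs y =
      (PySem.Set.ofList ((pvQ X_objs y).map Prod.fst)).map
        (fun c => (c, pyMaxByCount (pvF X_objs y c))) := by
  show ((((PySem.List.pyRange 0 (PySem.List.len X_objs)).foldl (stepAfun y)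
      PySem.Dict.empty).items.foldl (outAfun X_objs) PySem.Dict.empty)).items
    = _
  rw [resultsA]
  set L2 := (PySem.List.pyRange 0 (PySem.List.len X_objs)).map
      (fun i => ((PySem.List.pyGetD y i 0 : Int), i)) with hL2
  set res := L2.foldl (fun d p => d.modify p.1 [] (fun v => v ++ [p.2])) PySem.Dict.empty with hres
  have hnd : res.keys.Nodup := by
    rw [hres]
    exact PySem.Dict.nodup_keys_foldl_modify_key L2 Prod.fst [] (fun d p v => v ++ [p.2])
      PySem.Dict.empty PySem.Dict.nodup_keys_empty
  have hout : (res.items.foldl (outAfun X_objs) PySem.Dict.empty).items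
      = [] ++ res.items.map (fun a => (a.1, get_panel_obj
          (a.2.foldl (fun acc item => acc ++ [PySem.List.pyGetD X_objs item []]) []))) :=
    PySem.Dict.items_foldl_insert_fresh res.items Prod.fst
      (fun a => get_panel_obj (a.2.foldl (fun acc item => acc ++ [PySem.List.pyGetD X_objs item []]) []))
      PySem.Dict.empty (fun a _ => PySem.Dict.contains_empty a.1) hnd
  rw [hout, List.nil_append]
  rw [PySem.Dict.items_eq_map_keys res hnd [], List.map_map]
  have hkeys : res.keys = PySem.Set.ofList (L2.map Prod.fst) := by
    rw [hres, PySem.Dict.keys_foldl_modify_key L2 Prod.fst [] (fun d p v => v ++ [p.2])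
      PySem.Dict.empty]
    rw [PySem.Dict.keys_empty, PySem.Set.update_nil_left]
  have hlab : L2.map Prod.fst = (pvQ X_objs y).map Prod.fst := by
    rw [← bridge X_objs y h, hL2, List.map_map, List.map_map]
    rfl
  have hQ : pvQ X_objs y = L2.map (fun p => (p.1, PySem.List.pyGetD X_objs p.2 [])) := by
    rw [← bridge X_objs y h, hL2, List.map_map]
    rfl
  rw [hkeys, hlab]
  apply List.map_congr_left
  intro c hc
  simp only [Function.comp]
  have hgetD : res.getD c [] = (L2.filter (fun p => p.1 == c)).map (fun x => x.2) := by
    rw [hres, PySem.Dict.getD_foldl_modify_append L2 PySem.Dict.empty c,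
      PySem.Dict.getD_empty, List.nil_append]
  rw [hgetD, PySem.List.foldl_append_singleton_eq_map, List.nil_append]
  unfold get_panel_obj
  have hF : pvF X_objs y c
      = (((L2.filter (fun p => p.1 == c)).map (fun x => x.2)).map
          (fun item => PySem.List.pyGetD X_objs item [])).flatten := by
    unfold pvF
    rw [hQ, List.filter_map, List.map_map, List.map_map]
    rfl
  rw [hF]

-- first key (insertion order) with maximal value, i.e. A's tie-break; proof-side only
def firstMaxByVal (items : List (Int × Int)) : Int :=
  match items with
  | [] => 0
  | p :: t => (t.foldl (fun best q => if q.2 > best.2 then q else best) p).1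

theorem sel_le (f : Int → Int) (b x : Int) : f b ≤ f (selMax f b x) := by
  unfold selMax; split_ifs with h
  · omega
  · omega

theorem fold_sel_dedup (f : Int → Int) :
    ∀ (t : List Int) (b : Int) (s : List Int), (∀ x ∈ s, f x ≤ f b) →
      t.foldl (selMax f) b
        = ((PySem.Set.ofList t).filter (fun z => !(s.contains z))).foldl (selMax f) b := by
  intro t
  induction t with
  | nil => intro b s _; simp [PySem.Set.ofList_nil]
  | cons x t ih =>
    intro b s hs
    rw [List.foldl_cons, PySem.Set.ofList_cons]
    by_cases hx : x ∈ s
    · have hbx : selMax f b x = b := by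
        unfold selMax
        have := hs x hx
        split_ifs with h
        · omega
        · rfl
      have hcx : s.contains x = true := List.elem_eq_true_of_mem hx
      rw [hbx, List.filter_cons]
      simp only [hcx, Bool.not_true, Bool.false_eq_true, if_false]
      have hfil : ((PySem.Set.ofList t).discard x).filter (fun z => !(s.contains z))
          = (PySem.Set.ofList t).filter (fun z => !(s.contains z)) := by
        show ((PySem.Set.ofList t).filter (fun z => !(z == x))).filter (fun z => !(s.contains z))
            = _
        rw [List.filter_filter]
        apply List.filter_congr
        intro z _
        by_cases hzx : z = x
        · subst hzx
          simp [hx]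
        · simp [hzx]
      rw [hfil]
      exact ih b s hs
    · have hcx : s.contains x = false := by
        simp [List.contains_eq_mem, hx]
      rw [List.filter_cons]
      simp only [hcx, Bool.not_false, if_true]
      rw [List.foldl_cons]
      have hfil : ((PySem.Set.ofList t).discard x).filter (fun z => !(s.contains z))
          = (PySem.Set.ofList t).filter (fun z => !((s ++ [x]).contains z)) := by
        show ((PySem.Set.ofList t).filter (fun z => !(z == x))).filter (fun z => !(s.contains z))
            = _
        rw [List.filter_filter]
        apply List.filter_congr
        intro z _
        by_cases hzx : z = x
        · subst hzx; simp
        · simp [hzx, List.contains_eq_mem]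
      rw [hfil]
      apply ih (selMax f b x) (s ++ [x])
      intro z hz
      rcases List.mem_append.mp hz with h1 | h1
      · exact le_trans (hs z h1) (sel_le f b x)
      · rcases List.mem_singleton.mp h1 with rfl
        unfold selMax
        split_ifs with h
        · omega
        · exact le_trans (by omega) (le_refl _)

theorem fold_sel_map (f : Int → Int) :
    ∀ (l : List Int) (b : Int),
      (l.map (fun k => (k, f k))).foldl (fun best q => if q.2 > best.2 then q else best) (b, f b)
        = (l.foldl (selMax f) b, f (l.foldl (selMax f) b)) := by
  intro l
  induction l with
  | nil => intro b; simp
  | cons x l ih =>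
    intro b
    rw [List.map_cons, List.foldl_cons, List.foldl_cons]
    have hstep : (if (x, f x).2 > (b, f b).2 then (x, f x) else (b, f b))
        = (selMax f b x, f (selMax f b x)) := by
      unfold selMax
      split_ifs with h
      · rfl
      · rfl
    rw [hstep, ih]

theorem maxcount (F : List Int) (hF : F ≠ []) :
    pyMaxByCount F = firstMaxByVal (PySem.Dict.counter F).items := by
  match F, hF with
  | h :: t, _ =>
    rw [PySem.Dict.items_counter, PySem.Set.ofList_cons, List.map_cons]
    show t.foldl (fun best el => if (h :: t).count el > (h :: t).count best then el else best) h
      = ((((PySem.Set.ofList t).discard h).map (fun k => (k, ((h :: t).count k : Int)))).foldl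
          (fun best q => if q.2 > best.2 then q else best) (h, ((h :: t).count h : Int))).1
    rw [fold_sel_map (fun k => ((h :: t).count k : Int)) ((PySem.Set.ofList t).discard h) h]
    show _ = ((PySem.Set.ofList t).discard h).foldl (selMax (fun k => ((h :: t).count k : Int))) h
    have h1 : t.foldl (fun best el => if (h :: t).count el > (h :: t).count best then el else best) h
        = t.foldl (selMax (fun k => ((h :: t).count k : Int))) h := by
      apply PySem.List.foldl_congr_mem
      intro b x _
      unfold selMax
      simp only [gt_iff_lt, Nat.cast_lt]
    rw [h1, fold_sel_dedup (fun k => ((h :: t).count k : Int)) t h [h]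
      (by intro z hz; rcases List.mem_singleton.mp hz with rfl; exact le_refl _)]
    congr 1
    show List.filter (fun z => !([h].contains z)) (PySem.Set.ofList t)
        = List.filter (fun z => !(z == h)) (PySem.Set.ofList t)
    apply List.filter_congr
    intro z _
    by_cases hzh : z = h
    · simp [hzh]
    · simp [List.contains_eq_mem, hzh]

theorem F_ne (X_objs : List (List Int)) (y : List Int) (pre : Pre_get_panel X_objs y) :
    ∀ c ∈ PySem.Set.ofList ((pvQ X_objs y).map Prod.fst), pvF X_objs y c ≠ [] := by
  obtain ⟨hlen, hpre⟩ := pre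
  have hzlen : (X_objs.zip y).length = X_objs.length := by
    simp [List.length_zip]; omega
  intro c hc
  rw [PySem.Set.mem_ofList] at hc
  obtain ⟨q, hq, hqc⟩ := List.mem_map.mp hc
  obtain ⟨p, hp, hpq⟩ := List.mem_map.mp hq
  obtain ⟨k, hk, hkp⟩ := List.mem_iff_getElem.mp hp
  have hkn : k < X_objs.length := by omega
  have hky : k < y.length := by omega
  have hyk : y[k] = c := by
    have := List.getElem_zip (h := hk)
    rw [this] at hkp
    subst hpq hqc hkp
    rfl
  obtain ⟨j, hjr, hyj, hXj⟩ := hpre k (List.mem_range.mpr hkn)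
  have hjn : j < X_objs.length := List.mem_range.mp hjr
  have hjy : j < y.length := lt_of_lt_of_le hjn hlen
  have hjz : j < (X_objs.zip y).length := by omega
  have hyjc : y[j] = c := by
    rw [List.getD_eq_getElem _ _ hjy, List.getD_eq_getElem _ _ hky, hyk] at hyj
    exact hyj
  have hmem : ((y[j] : Int), X_objs[j]) ∈ pvQ X_objs y := by
    unfold pvQ
    apply List.mem_map.mpr
    exact ⟨(X_objs[j], y[j]), by
      apply List.mem_iff_getElem.mpr
      exact ⟨j, hjz, List.getElem_zip (h := hjz)⟩, rfl⟩
  intro hnil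
  unfold pvF at hnil
  rw [List.flatten_eq_nil_iff] at hnil
  have : X_objs[j] = [] := by
    apply hnil
    apply List.mem_map.mpr
    refine ⟨(y[j], X_objs[j]), List.mem_filter.mpr ⟨hmem, ?_⟩, rfl⟩
    simp [hyjc]
  rw [List.getD_eq_getElem _ _ hjn] at hXj
  exact hXj this

-- ---------- B-side: the streaming fold over one label's flattened group ----------

-- "first key with maximal count": m is in s and lexicographically (count, -index) maximal
def pvSpec (s : List Int) (v : Int → Int) (m : Int) : Prop :=
  m ∈ s ∧ ∀ z ∈ s, v z < v m ∨ (v z = v m ∧ List.idxOf m s ≤ List.idxOf z s)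

def fmv (p : List Int) : Int := firstMaxByVal (PySem.Dict.counter p).items

theorem selfold_spec (v : Int → Int) (t : List Int) (h : Int) (hnd : (h :: t).Nodup) :
    pvSpec (h :: t) v (t.foldl (selMax v) h) := by
  induction t using List.reverseRecOn with
  | nil =>
    refine ⟨List.mem_singleton_self h, ?_⟩
    intro z hz
    rcases List.mem_singleton.mp hz with rfl
    exact Or.inr ⟨rfl, le_refl _⟩
  | append_singleton t x ih =>
    have hnd2 : ((h :: t) ++ [x]).Nodup := by simpa using hnd
    obtain ⟨hnd', _, hdisj⟩ := List.nodup_append.mp hnd2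
    have hxn : x ∉ h :: t := fun hx => hdisj x hx x (List.mem_singleton_self x) rfl
    obtain ⟨hmem, hsp⟩ := ih hnd'
    rw [List.foldl_append, List.foldl_cons, List.foldl_nil]
    set r := t.foldl (selMax v) h with hr
    have hidx : ∀ z ∈ h :: t, List.idxOf z (h :: (t ++ [x])) = List.idxOf z (h :: t) := by
      intro z hz
      show List.idxOf z ((h :: t) ++ [x]) = _
      exact List.idxOf_append_of_mem hz
    have hidxx : List.idxOf x (h :: (t ++ [x])) = (h :: t).length := by
      show List.idxOf x ((h :: t) ++ [x]) = _
      rw [List.idxOf_append_of_notMem hxn]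
      simp
    unfold selMax
    split_ifs with hvx
    · refine ⟨by simp, ?_⟩
      intro z hz
      rcases (by simpa using hz : z = h ∨ z ∈ t ∨ z = x) with heq | hz' | heq
      · subst heq
        left
        rcases hsp z (List.mem_cons_self) with hlt | ⟨heq, _⟩
        · omega
        · omega
      · left
        rcases hsp z (List.mem_cons_of_mem h hz') with hlt | ⟨heq, _⟩
        · omega
        · omega
      · subst heq
        exact Or.inr ⟨rfl, le_refl _⟩
    · refine ⟨by rcases List.mem_cons.mp hmem with h1 | h1 <;> simp [h1], ?_⟩
      intro z hz
      rcases (by simpa using hz : z = h ∨ z ∈ t ∨ z = x) with heq | hz' | heq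
      · subst heq
        rcases hsp z List.mem_cons_self with hlt | ⟨heq, hle⟩
        · exact Or.inl hlt
        · exact Or.inr ⟨heq, by rw [hidx r hmem, hidx z List.mem_cons_self]; exact hle⟩
      · rcases hsp z (List.mem_cons_of_mem h hz') with hlt | ⟨heq, hle⟩
        · exact Or.inl hlt
        · exact Or.inr ⟨heq, by
            rw [hidx r hmem, hidx z (List.mem_cons_of_mem h hz')]; exact hle⟩
      · subst heq
        by_cases hvex : v z = v r
        · refine Or.inr ⟨hvex, ?_⟩
          rw [hidx r hmem, hidxx]
          have := List.idxOf_lt_length_of_mem hmem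
          omega
        · exact Or.inl (by omega)

theorem spec_unique (s : List Int) (v : Int → Int) (x z : Int) (_hnd : s.Nodup)
    (hx : pvSpec s v x) (hz : pvSpec s v z) : x = z := by
  obtain ⟨hxm, hxs⟩ := hx
  obtain ⟨hzm, hzs⟩ := hz
  have h1 := hxs z hzm
  have h2 := hzs x hxm
  have hidx : List.idxOf x s = List.idxOf z s := by
    rcases h1 with h1 | ⟨e1, l1⟩ <;> rcases h2 with h2 | ⟨e2, l2⟩ <;> omega
  have e1 : s[List.idxOf x s]? = some x := by
    rw [List.getElem?_eq_getElem (List.idxOf_lt_length_of_mem hxm)]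
    exact congrArg some (List.getElem_idxOf (List.idxOf_lt_length_of_mem hxm))
  have e2 : s[List.idxOf z s]? = some z := by
    rw [List.getElem?_eq_getElem (List.idxOf_lt_length_of_mem hzm)]
    exact congrArg some (List.getElem_idxOf (List.idxOf_lt_length_of_mem hzm))
  rw [hidx, e2] at e1
  exact (Option.some.injEq _ _ ▸ e1).symm

theorem fmv_spec (p : List Int) (hp : p ≠ []) :
    pvSpec (PySem.Set.ofList p) (fun z => (p.count z : Int)) (fmv p) := by
  have hnd : (PySem.Set.ofList p).Nodup := PySem.Set.nodup_ofList p
  have hne : PySem.Set.ofList p ≠ [] := by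
    match p, hp with
    | a :: q, _ =>
      rw [PySem.Set.ofList_cons]
      exact List.cons_ne_nil _ _
  match hs : PySem.Set.ofList p, hne, hnd with
  | h :: t, _, hnd =>
    have : fmv p = t.foldl (selMax (fun z => (p.count z : Int))) h := by
      unfold fmv
      rw [PySem.Dict.items_counter, hs, List.map_cons]
      show ((t.map (fun k => (k, (p.count k : Int)))).foldl
          (fun best q => if q.2 > best.2 then q else best) (h, (p.count h : Int))).1 = _
      rw [fold_sel_map (fun k => (p.count k : Int)) t h]
    rw [this]
    exact selfold_spec (fun z => (p.count z : Int)) t h hnd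

theorem pvLexGT_iff (c1 f1 c2 f2 : Int) :
    pvLexGT c1 f1 c2 f2 = true ↔ (c2 < c1 ∨ (c1 = c2 ∧ f1 < f2)) := by
  simp [pvLexGT]

theorem fmv_step (p : List Int) (el : Int) (hp : p ≠ []) :
    fmv (p ++ [el])
      = (if pvLexGT ((p ++ [el]).count el) (List.idxOf el (PySem.Set.ofList (p ++ [el])))
             ((p ++ [el]).count (fmv p)) (List.idxOf (fmv p) (PySem.Set.ofList (p ++ [el])))
         then el else fmv p) := by
  have hp' : p ++ [el] ≠ [] := by simp
  have hnd' : (PySem.Set.ofList (p ++ [el])).Nodup := PySem.Set.nodup_ofList _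
  have hspec' := fmv_spec (p ++ [el]) hp'
  have hbs := fmv_spec p hp
  set s := PySem.Set.ofList p with hsdef
  set s' := PySem.Set.ofList (p ++ [el]) with hs'def
  set b := fmv p with hbdef
  have hmem' : ∀ z : Int, z ∈ s' ↔ z ∈ s ∨ z = el := by
    intro z
    rw [hs'def, PySem.Set.ofList_append_singleton, ← hsdef]
    exact PySem.Set.mem_add (PySem.Set.ofList p) el z
  have hcnt : ∀ z : Int, (p ++ [el]).count z = p.count z + (if z = el then 1 else 0) := by
    intro z
    rw [List.count_append]
    by_cases hz : z = el
    · subst hz; simp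
    · simp [hz, Ne.symm hz]
  have hidxmem : ∀ z ∈ s, List.idxOf z s' = List.idxOf z s := by
    intro z hz
    rw [hs'def, PySem.Set.ofList_append_singleton, ← hsdef]
    by_cases hel : el ∈ s
    · rw [PySem.Set.add_of_mem hel]
    · rw [PySem.Set.add_of_not_mem hel]
      exact List.idxOf_append_of_mem hz
  have hbmem : b ∈ s := hbs.1
  apply spec_unique s' (fun z => ((p ++ [el]).count z : Int)) _ _ hnd' hspec'
  split_ifs with hgt
  · -- the new element lexicographically beats the old winner
    rw [pvLexGT_iff] at hgt
    have hbe : b ≠ el := by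
      rintro rfl
      rcases hgt with h | ⟨_, h2⟩
      · omega
      · omega
    refine ⟨(hmem' el).mpr (Or.inr rfl), ?_⟩
    intro z hz
    by_cases hze : z = el
    · subst hze; exact Or.inr ⟨rfl, le_refl _⟩
    · have hzs : z ∈ s := ((hmem' z).mp hz).resolve_right hze
      have e1 : (p ++ [el]).count z = p.count z := by rw [hcnt z]; simp [hze]
      have e2 : (p ++ [el]).count b = p.count b := by rw [hcnt b]; simp [hbe]
      have i1 : List.idxOf z s' = List.idxOf z s := hidxmem z hzs
      have i2 : List.idxOf b s' = List.idxOf b s := hidxmem b hbmem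
      have hbz := hbs.2 z hzs
      beta_reduce at hbz
      rcases hbz with hlt | ⟨heq, hle⟩
      · rcases hgt with hg | ⟨hg1, hg2⟩
        · exact Or.inl (by beta_reduce; omega)
        · exact Or.inl (by beta_reduce; omega)
      · rcases hgt with hg | ⟨hg1, hg2⟩
        · exact Or.inl (by beta_reduce; omega)
        · exact Or.inr ⟨by beta_reduce; omega, by omega⟩
  · -- the old winner stays
    rw [pvLexGT_iff] at hgt
    have h1 : ¬ (((p ++ [el]).count b : Int) < ((p ++ [el]).count el : Int)) :=
      fun h => hgt (Or.inl h)
    have h2 : ¬ (((p ++ [el]).count el : Int) = ((p ++ [el]).count b : Int) ∧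
        (List.idxOf el s' : Int) < (List.idxOf b s' : Int)) :=
      fun h => hgt (Or.inr h)
    refine ⟨(hmem' b).mpr (Or.inl hbmem), ?_⟩
    intro z hz
    by_cases hze : z = el
    · by_cases hbe : b = z
      · exact Or.inr ⟨by rw [hbe], by rw [hbe]⟩
      · rw [hze]
        by_cases heq : ((p ++ [el]).count el : Int) = ((p ++ [el]).count b : Int)
        · refine Or.inr ⟨heq, ?_⟩
          have := fun hlt => h2 ⟨heq, hlt⟩
          omega
        · exact Or.inl (by beta_reduce; omega)
    · have hzs : z ∈ s := ((hmem' z).mp hz).resolve_right hze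
      have e1 : (p ++ [el]).count z = p.count z := by rw [hcnt z]; simp [hze]
      have i1 : List.idxOf z s' = List.idxOf z s := hidxmem z hzs
      have i2 : List.idxOf b s' = List.idxOf b s := hidxmem b hbmem
      by_cases hbe : b = el
      · have e2 : (p ++ [el]).count b = p.count b + 1 := by rw [hcnt b]; simp [hbe]
        have hbz := hbs.2 z hzs
        beta_reduce at hbz
        rcases hbz with hlt | ⟨heq, hle⟩
        · exact Or.inl (by beta_reduce; omega)
        · exact Or.inl (by beta_reduce; omega)
      · have e2 : (p ++ [el]).count b = p.count b := by rw [hcnt b]; simp [hbe]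
        have hbz := hbs.2 z hzs
        beta_reduce at hbz
        rcases hbz with hlt | ⟨heq, hle⟩
        · exact Or.inl (by beta_reduce; omega)
        · exact Or.inr ⟨by beta_reduce; omega, by omega⟩

-- the loop invariant of B's streaming pass over one label's element stream
def pvInv (p : List Int) (st : pvSt) : Prop :=
  (∀ x : Int, st.1.getD x 0 = (p.count x : Int)) ∧
  st.2.1.keys = PySem.Set.ofList p ∧
  (∀ x ∈ PySem.Set.ofList p, st.2.1.getD x 0 = (List.idxOf x (PySem.Set.ofList p) : Int)) ∧
  st.2.2.2 = ((PySem.Set.ofList p).length : Int) ∧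
  st.2.2.1 = (if p = [] then none else some (fmv p))

theorem fmv_singleton (el : Int) : fmv [el] = el := by
  unfold fmv
  rw [PySem.Dict.items_counter]
  rfl

theorem inv_step (p : List Int) (el : Int) (st : pvSt) (h : pvInv p st) :
    pvInv (p ++ [el]) (pvElStep st el) := by
  obtain ⟨cnts, fst0, bst, rk⟩ := st
  obtain ⟨c1, c2, c3, c4, c5⟩ := h
  dsimp only at c1 c2 c3 c4 c5
  subst c5
  have hpe : p ++ [el] ≠ [] := by simp
  have hcnt : ∀ z : Int, (p ++ [el]).count z = p.count z + (if z = el then 1 else 0) := by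
    intro z
    rw [List.count_append]
    by_cases hz : z = el
    · subst hz; simp
    · simp [hz, Ne.symm hz]
  have h1 : ∀ x : Int, (cnts.insert el (cnts.getD el 0 + 1)).getD x 0
      = ((p ++ [el]).count x : Int) := by
    intro x
    rw [PySem.Dict.getD_insert, hcnt x]
    split_ifs with hx
    · subst hx; rw [c1]; push_cast; simp
    · rw [c1]; simp
  by_cases hel : el ∈ PySem.Set.ofList p
  · -- el already seen for this label: first dict and rank unchanged
    have hs' : PySem.Set.ofList (p ++ [el]) = PySem.Set.ofList p := by
      rw [PySem.Set.ofList_append_singleton, PySem.Set.add_of_mem hel]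
    have hcont : fst0.contains el = true := by
      rw [PySem.Dict.contains_iff_mem_keys, c2]; exact hel
    have hp0 : p ≠ [] := by
      rintro rfl
      simp [PySem.Set.ofList_nil] at hel
    simp only [pvElStep, hcont, if_true, if_neg hp0]
    have h3 : ∀ x ∈ PySem.Set.ofList (p ++ [el]), fst0.getD x 0
        = (List.idxOf x (PySem.Set.ofList (p ++ [el])) : Int) := by
      intro x hx
      rw [hs'] at hx ⊢
      exact c3 x hx
    refine ⟨h1, by rw [hs']; exact c2, h3, by rw [hs']; exact c4, ?_⟩
    rw [if_neg hpe]
    have hb := (fmv_spec p hp0).1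
    show (if pvLexGT ((cnts.insert el (cnts.getD el 0 + 1)).getD el 0) (fst0.getD el 0)
        ((cnts.insert el (cnts.getD el 0 + 1)).getD (fmv p) 0) (fst0.getD (fmv p) 0)
      then some el else some (fmv p)) = some (fmv (p ++ [el]))
    rw [h1 el, h1 (fmv p),
      h3 el (by rw [hs']; exact hel), h3 (fmv p) (by rw [hs']; exact hb)]
    rw [fmv_step p el hp0]
    split_ifs <;> rfl
  · -- el is new for this label: it gets the next rank
    have hs' : PySem.Set.ofList (p ++ [el]) = PySem.Set.ofList p ++ [el] := by
      rw [PySem.Set.ofList_append_singleton, PySem.Set.add_of_not_mem hel]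
    have hcont : fst0.contains el = false := by
      rw [← Bool.not_eq_true, PySem.Dict.contains_iff_mem_keys, c2]; exact hel
    simp only [pvElStep, hcont, Bool.false_eq_true, if_false]
    have h2 : (fst0.insert el rk).keys = PySem.Set.ofList (p ++ [el]) := by
      rw [PySem.Dict.keys_insert_of_not_contains fst0 rk hcont, c2, hs']
    have h3 : ∀ x ∈ PySem.Set.ofList (p ++ [el]), (fst0.insert el rk).getD x 0
        = (List.idxOf x (PySem.Set.ofList (p ++ [el])) : Int) := by
      intro x hx
      rw [hs'] at hx ⊢
      rcases List.mem_append.mp hx with hxs | hxe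
      · have hxe : x ≠ el := fun he => hel (he ▸ hxs)
        rw [PySem.Dict.getD_insert, if_neg hxe, c3 x hxs,
          List.idxOf_append_of_mem hxs]
      · rcases List.mem_singleton.mp hxe with rfl
        rw [PySem.Dict.getD_insert_self, c4, List.idxOf_append_of_notMem hel]
        simp
    have h4 : rk + 1 = ((PySem.Set.ofList (p ++ [el])).length : Int) := by
      rw [hs', List.length_append, c4]
      push_cast
      simp
    refine ⟨h1, h2, h3, h4, ?_⟩
    by_cases hp0 : p = []
    · subst hp0
      rw [if_neg hpe]
      show some el = some (fmv ([] ++ [el]))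
      rw [List.nil_append, fmv_singleton]
    · simp only [if_neg hp0]
      rw [if_neg hpe]
      have hb := (fmv_spec p hp0).1
      show (if pvLexGT ((cnts.insert el (cnts.getD el 0 + 1)).getD el 0)
          ((fst0.insert el rk).getD el 0)
          ((cnts.insert el (cnts.getD el 0 + 1)).getD (fmv p) 0)
          ((fst0.insert el rk).getD (fmv p) 0)
        then some el else some (fmv p)) = some (fmv (p ++ [el]))
      rw [h1 el, h1 (fmv p),
        h3 el (by rw [hs']; exact List.mem_append_right _ (List.mem_singleton_self el)),
        h3 (fmv p) (by rw [hs']; exact List.mem_append_left _ hb)]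
      rw [fmv_step p el hp0]
      split_ifs <;> rfl

theorem inv_fold (p : List Int) : pvInv p (p.foldl pvElStep pvInitSt) := by
  induction p using List.reverseRecOn with
  | nil =>
    refine ⟨?_, ?_, ?_, ?_, rfl⟩
    · intro x; simp [pvInitSt, PySem.Dict.getD_empty]
    · simp [pvInitSt, PySem.Dict.keys_empty, PySem.Set.ofList_nil]
    · intro x hx; simp [PySem.Set.ofList_nil] at hx
    · simp [pvInitSt, PySem.Set.ofList_nil]
  | append_singleton p el ih =>
    rw [List.foldl_append, List.foldl_cons, List.foldl_nil]
    exact inv_step p el _ ih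

theorem online_eq (F : List Int) (hF : F ≠ []) :
    (F.foldl pvElStep pvInitSt).2.2.1 = some (fmv F) := by
  have h := (inv_fold F).2.2.2.2
  rw [h, if_neg hF]

def stepBfun : PySem.Dict Int pvSt → List Int × Int → PySem.Dict Int pvSt :=
  fun s p => s.insert p.2 (pvRowStep (s.getD p.2 pvInitSt) p.1)

theorem lemB (P : List (List Int × Int)) :
    ∀ (cs : PySem.Dict Int pvSt) (l : Int),
      (P.foldl stepBfun cs).getD l pvInitSt
        = (((P.filter (fun p => p.2 == l)).map Prod.fst).flatten).foldl pvElStep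
            (cs.getD l pvInitSt) := by
  induction P with
  | nil => intro cs l; simp
  | cons p P ih =>
    intro cs l
    rw [List.foldl_cons, ih]
    by_cases hl : p.2 = l
    · have hstep : (stepBfun cs p).getD l pvInitSt
          = p.1.foldl pvElStep (cs.getD l pvInitSt) := by
        unfold stepBfun
        rw [← hl, PySem.Dict.getD_insert_self]
        rfl
      rw [hstep, List.filter_cons]
      simp only [hl, beq_self_eq_true, if_pos, List.map_cons, List.flatten_cons,
        List.foldl_append]
    · have hstep : (stepBfun cs p).getD l pvInitSt = cs.getD l pvInitSt := by
        unfold stepBfun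
        rw [PySem.Dict.getD_insert_of_ne]
        exact Ne.symm hl
      have hb : (p.2 == l) = false := beq_eq_false_iff_ne.mpr hl
      rw [hstep, List.filter_cons]
      simp only [hb, Bool.false_eq_true, if_false]

theorem B_closed (X_objs : List (List Int)) (y : List Int) :
    get_panel_alt X_objs y =
      (PySem.Set.ofList ((pvQ X_objs y).map Prod.fst)).map
        (fun c => (c, ((pvF X_objs y c).foldl pvElStep pvInitSt).2.2.1.getD 0)) := by
  show (((X_objs.zip y).foldl stepBfun PySem.Dict.empty).items.map
      (fun kv => (kv.1, kv.2.2.2.1.getD 0))) = _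
  set P := X_objs.zip y with hP
  set st := P.foldl stepBfun PySem.Dict.empty with hst
  have hnd : st.keys.Nodup := by
    rw [hst]
    unfold stepBfun
    exact PySem.Dict.nodup_keys_foldl_insert_key P Prod.snd
      (fun (s : PySem.Dict Int pvSt) p => pvRowStep (s.getD p.2 pvInitSt) p.1)
      PySem.Dict.empty PySem.Dict.nodup_keys_empty
  rw [PySem.Dict.items_eq_map_keys st hnd pvInitSt, List.map_map]
  have hkeys : st.keys = PySem.Set.ofList (P.map Prod.snd) := by
    rw [hst]
    unfold stepBfun
    rw [PySem.Dict.keys_foldl_insert_key P Prod.snd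
      (fun (s : PySem.Dict Int pvSt) p => pvRowStep (s.getD p.2 pvInitSt) p.1)
      PySem.Dict.empty]
    rw [PySem.Dict.keys_empty, PySem.Set.update_nil_left]
  have hlab : P.map Prod.snd = (pvQ X_objs y).map Prod.fst := by
    unfold pvQ; rw [← hP, List.map_map]; rfl
  rw [hkeys, hlab]
  apply List.map_congr_left
  intro c hc
  simp only [Function.comp]
  have hgetD : st.getD c pvInitSt = (pvF X_objs y c).foldl pvElStep pvInitSt := by
    rw [hst, lemB P PySem.Dict.empty c, PySem.Dict.getD_empty]
    congr 1
    unfold pvF pvQ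
    rw [← hP, List.filter_map, List.map_map]
    rfl
  rw [hgetD]

-- ===== VERDICT (by name: the statement is the Claim_ definition above) =====
theorem get_panel_spec : Claim_equal_get_panel := by
  intro X_objs y _ pre
  unfold Spec_get_panel
  rw [A_closed X_objs y pre.1, B_closed]
  apply List.map_congr_left
  intro c hc
  have hne := F_ne X_objs y pre c hc
  rw [online_eq (pvF X_objs y c) hne, Option.getD_some,
    maxcount (pvF X_objs y c) hne]
  rfl
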